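-- pv_equiv track=rewrite | github.com/json420/novacut | novacut/thumbnail.py | walk_backward
-- ===== SOURCE A (Python) =====
-- def walk_backward(existing, frame, steps=1):
--     assert frame >= 0
--     assert frame not in existing
--     assert steps >= 1
--     for i in range(steps):
--         frame -= 1
--         if frame < 0 or frame in existing:
--             return frame + 1
--     return frame
-- ===== SOURCE B (Python) =====
-- def walk_backward(existing, frame, steps=1):
--     assert frame >= 0
--     assert frame not in existing
--     assert steps >= 1
--     stop = max(frame - steps, 0)
--     for e in existing:
--         if stop <= e < frame:
--             stop = e + 1
--     return stop
-- ===== Notes on version B (the rewrite author's own statement) =====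
-- stated objective: alternative
-- what changed: Replaces the step-by-step backward walk (one membership scan of existing per step) by a single pass over existing that computes the nearest blocking predecessor below frame, returning max(frame-steps, pred+1, 0).
import Mathlib
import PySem

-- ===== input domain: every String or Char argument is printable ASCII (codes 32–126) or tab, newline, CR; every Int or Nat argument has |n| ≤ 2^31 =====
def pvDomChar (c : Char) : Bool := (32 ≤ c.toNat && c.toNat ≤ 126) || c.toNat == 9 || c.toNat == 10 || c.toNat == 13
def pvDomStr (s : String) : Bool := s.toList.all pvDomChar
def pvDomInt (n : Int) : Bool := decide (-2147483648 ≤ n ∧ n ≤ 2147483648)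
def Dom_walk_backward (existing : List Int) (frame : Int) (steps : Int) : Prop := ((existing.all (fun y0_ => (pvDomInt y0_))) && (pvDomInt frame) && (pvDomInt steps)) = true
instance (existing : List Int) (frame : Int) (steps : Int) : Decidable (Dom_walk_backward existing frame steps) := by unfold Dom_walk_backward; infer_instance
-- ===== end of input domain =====

-- B replaces A's step-by-step backward walk (a membership scan per step) with a single
-- pass over `existing` computing the nearest blocking predecessor below frame.


-- ===== PORT A =====
-- `for i in range(steps): frame -= 1; if frame < 0 or frame in existing: return frame + 1`
def walk_backward_loop (existing : List Int) (frame : Int) : Nat → Int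
  | 0 => frame
  | n + 1 =>
    let f := frame - 1
    if f < 0 ∨ f ∈ existing then f + 1 else walk_backward_loop existing f n

def walk_backward (existing : List Int) (frame : Int) (steps : Int) : Int :=
  walk_backward_loop existing frame steps.toNat

-- ===== PORT B =====
-- stop = max(frame - steps, 0); for e in existing: if stop <= e < frame: stop = e + 1
def walk_backward_alt (existing : List Int) (frame : Int) (steps : Int) : Int :=
  existing.foldl (fun stop e => if stop ≤ e ∧ e < frame then e + 1 else stop)
    (max (frame - steps) 0)

-- ===== PRECONDITION & SPEC =====
-- Pre_ = exactly A's asserts (A raises AssertionError outside them).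
def Pre_walk_backward (existing : List Int) (frame : Int) (steps : Int) : Prop :=
  0 ≤ frame ∧ frame ∉ existing ∧ 1 ≤ steps
instance (existing : List Int) (frame : Int) (steps : Int) : Decidable (Pre_walk_backward existing frame steps) := by unfold Pre_walk_backward; infer_instance

def pvWitness_walk_backward : List Int × Int × Int := ([3, 7], 6, 4)

def Spec_walk_backward (existing : List Int) (frame : Int) (steps : Int) (out : Int) : Prop := out = walk_backward_alt existing frame steps
instance (existing : List Int) (frame : Int) (steps : Int) (out : Int) : Decidable (Spec_walk_backward existing frame steps out) := by unfold Spec_walk_backward; infer_instance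

-- ===== CLAIM (what is proved, stated in full; the proofs are below) =====
def Claim_equal_walk_backward : Prop := ∀ (existing : List Int) (frame : Int) (steps : Int), Dom_walk_backward existing frame steps → Pre_walk_backward existing frame steps → Spec_walk_backward existing frame steps (walk_backward existing frame steps)

-- ===== LEMMAS AND PROOFS =====

-- common reference fold: max of the seed and of e+1 over members e < frame
def pvSpec (l : List Int) (frame s : Int) : Int :=
  l.foldl (fun m e => if e < frame then max m (e + 1) else m) s

theorem pvSpec_alt_eq (frame : Int) : ∀ (l : List Int) (s : Int),
    l.foldl (fun stop e => if stop ≤ e ∧ e < frame then e + 1 else stop) s = pvSpec l frame s := by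
  intro l
  induction l with
  | nil => intro s; rfl
  | cons e t ih =>
    intro s
    simp only [pvSpec, List.foldl_cons] at *
    rw [ih]
    have : (if s ≤ e ∧ e < frame then e + 1 else s) = (if e < frame then max s (e + 1) else s) := by
      split_ifs <;> omega
    rw [this]

theorem pvSpec_const (l : List Int) (frame s : Int) (h : frame ≤ s) : pvSpec l frame s = s := by
  induction l with
  | nil => rfl
  | cons e t ih =>
    simp only [pvSpec, List.foldl_cons] at *
    have : (if e < frame then max s (e + 1) else s) = s := by split_ifs <;> omega
    rw [this, ih]

theorem pvSpec_le (l : List Int) (frame : Int) : ∀ s : Int, s ≤ frame → pvSpec l frame s ≤ frame := by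
  induction l with
  | nil => intro s h; exact h
  | cons e t ih =>
    intro s h
    simp only [pvSpec, List.foldl_cons]
    apply ih
    split_ifs <;> omega

theorem pvSpec_ge_seed (l : List Int) (frame : Int) : ∀ s : Int, s ≤ pvSpec l frame s := by
  induction l with
  | nil => intro s; exact le_refl s
  | cons e t ih =>
    intro s
    simp only [pvSpec, List.foldl_cons]
    calc s ≤ (if e < frame then max s (e + 1) else s) := by split_ifs <;> omega
      _ ≤ _ := ih _

theorem pvSpec_ge_mem (l : List Int) (frame : Int) : ∀ (e : Int), e ∈ l → e < frame →
    ∀ s : Int, e + 1 ≤ pvSpec l frame s := by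
  induction l with
  | nil => intro e he; cases he
  | cons x t ih =>
    intro e he hlt s
    simp only [pvSpec, List.foldl_cons]
    rcases List.mem_cons.mp he with rfl | hmem
    · calc e + 1 ≤ (if e < frame then max s (e + 1) else s) := by split_ifs <;> omega
        _ ≤ _ := pvSpec_ge_seed t frame _
    · exact ih e hmem hlt _

theorem pvSpec_congr (f1 f2 : Int) : ∀ (l : List Int) (s : Int),
    (∀ e ∈ l, (e < f1 ↔ e < f2)) → pvSpec l f1 s = pvSpec l f2 s := by
  intro l
  induction l with
  | nil => intro s _; rfl
  | cons x t ih =>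
    intro s h
    simp only [pvSpec, List.foldl_cons]
    have hx := h x (List.mem_cons_self)
    have : (if x < f1 then max s (x + 1) else s) = (if x < f2 then max s (x + 1) else s) := by
      split_ifs <;> omega
    rw [this]
    exact ih _ (fun e he => h e (List.mem_cons_of_mem _ he))

theorem walk_backward_loop_char (l : List Int) : ∀ (n : Nat) (frame : Int),
    0 ≤ frame → frame ∉ l →
    walk_backward_loop l frame n = pvSpec l frame (max (frame - n) 0) := by
  intro n
  induction n with
  | zero =>
    intro frame h0 _
    simp only [walk_backward_loop]
    have : max (frame - (0 : Nat)) 0 = frame := by omega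
    rw [this, pvSpec_const l frame frame (le_refl _)]
  | succ n ih =>
    intro frame h0 hmem
    simp only [walk_backward_loop]
    by_cases hc : frame - 1 < 0 ∨ (frame - 1) ∈ l
    · rw [if_pos hc]
      rcases hc with hneg | hin
      · -- frame = 0: walk hits -1 immediately
        have hf : frame = 0 := by omega
        subst hf
        have : max ((0 : Int) - (n + 1 : Nat)) 0 = 0 := by omega
        rw [this, pvSpec_const l 0 0 (le_refl _)]
        omega
      · -- blocked at frame - 1 ∈ l: result frame
        have hle : pvSpec l frame (max (frame - (n + 1 : Nat)) 0) ≤ frame :=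
          pvSpec_le l frame _ (by omega)
        have hge : (frame - 1) + 1 ≤ pvSpec l frame (max (frame - (n + 1 : Nat)) 0) :=
          pvSpec_ge_mem l frame (frame - 1) hin (by omega) _
        omega
    · rw [if_neg hc]
      push_neg at hc
      obtain ⟨h1, h2⟩ := hc
      rw [ih (frame - 1) (by omega) h2]
      have hseed : max (frame - 1 - (n : Nat)) 0 = max (frame - (n + 1 : Nat)) 0 := by
        push_cast; omega
      rw [hseed]
      apply pvSpec_congr _ _
      intro e he
      constructor <;> intro h
      · omega
      · rcases lt_or_eq_of_le (by omega : e ≤ frame - 1) with h' | h'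
        · exact h'
        · exact absurd (h' ▸ he) h2

-- ===== VERDICT (by name: the statement is the Claim_ definition above) =====
theorem walk_backward_spec : Claim_equal_walk_backward := by
  intro existing frame steps _ hpre
  obtain ⟨h0, hmem, h1⟩ := hpre
  unfold Spec_walk_backward walk_backward walk_backward_alt
  rw [pvSpec_alt_eq, walk_backward_loop_char existing steps.toNat frame h0 hmem]
  have : ((steps.toNat : Int)) = steps := by omega
  rw [this]
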